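-- pv_equiv track=rewrite | github.com/Akasaka-Ryunosuke/res_2024-7-10 | question1.py | min_sub_times
-- ===== SOURCE A (Python) =====
-- def min_sub_times(source, target):
--     if len(source) == 0 or len(target) == 0:
--         return -1
--     times = 0
--     flag = True
--     j = 0
--     while flag and j < len(target):
--         flag = False
--         for i in range(len(source)):
--             if j < len(target) and source[i] == target[j]:
--                 j += 1
--                 flag = True
--         times += 1
--     if flag:
--         return times
--     else:
--         return -1
-- ===== SOURCE B (Python) =====
-- def min_sub_times(source, target):
--     # Jump through target by looking up the next occurrence of each character
--     # with str.find, instead of re-scanning source once per pass.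
--     if not source or not target:
--         return -1
--     times = 1
--     cur = -1
--     for c in target:
--         i = source.find(c, cur + 1)
--         if i < 0:
--             i = source.find(c)
--             if i < 0:
--                 return -1
--             times += 1
--         cur = i
--     return times
-- ===== Notes on version B (the rewrite author's own statement) =====
-- stated objective: faster
-- what changed: A repeatedly rescans the whole source once per pass with a progress flag; B makes a single pass over target, jumping to the next occurrence of each character via str.find and wrapping to a fresh copy of source when none remains.
import Mathlib
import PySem

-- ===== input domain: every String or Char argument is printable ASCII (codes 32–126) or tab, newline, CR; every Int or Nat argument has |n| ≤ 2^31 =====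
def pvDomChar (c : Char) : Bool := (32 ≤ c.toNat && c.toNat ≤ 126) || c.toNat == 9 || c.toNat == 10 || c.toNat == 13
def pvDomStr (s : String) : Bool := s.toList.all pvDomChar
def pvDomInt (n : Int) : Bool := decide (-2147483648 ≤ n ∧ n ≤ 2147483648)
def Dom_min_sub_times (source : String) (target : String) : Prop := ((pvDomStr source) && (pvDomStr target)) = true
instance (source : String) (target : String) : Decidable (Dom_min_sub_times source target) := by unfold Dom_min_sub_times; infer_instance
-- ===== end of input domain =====

-- B replaces A's repeated flag-driven rescans of source by a single pass over target that
-- jumps to the next occurrence of each character with str.find (measured faster).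

-- ===== PORT A =====
-- one `while`-body pass of A: `for i in range(len(source)): if j < len(target) and source[i] == target[j]: j += 1; flag = True`
def passA (src tgt : List Char) (j : Nat) : Nat × Bool :=
  src.foldl (fun s c => if s.1 < tgt.length ∧ tgt[s.1]? = some c then (s.1 + 1, true) else s) (j, false)

-- termination facts for aLoop (the pass never moves j backwards; flag=true means it moved)
theorem foldA_le (tgt : List Char) : ∀ (s : List Char) (j : Nat) (b : Bool),
    j ≤ (s.foldl (fun s c => if s.1 < tgt.length ∧ tgt[s.1]? = some c then (s.1 + 1, true) else s) (j, b)).1 := by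
  intro s
  induction s with
  | nil => intro j b; simp
  | cons c s ih =>
    intro j b
    simp only [List.foldl_cons]
    split
    · exact le_trans (Nat.le_succ j) (ih (j+1) true)
    · exact ih j b

theorem passA_le (src tgt : List Char) (j : Nat) : j ≤ (passA src tgt j).1 :=
  foldA_le tgt src j false

theorem passA_flag (src tgt : List Char) (j : Nat) :
    (passA src tgt j).2 = true → j < (passA src tgt j).1 := by
  suffices h : ∀ (s : List Char) (j : Nat) (b : Bool),
      (s.foldl (fun s c => if s.1 < tgt.length ∧ tgt[s.1]? = some c then (s.1 + 1, true) else s) (j, b)).2 = true →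
      b = true ∨ j < (s.foldl (fun s c => if s.1 < tgt.length ∧ tgt[s.1]? = some c then (s.1 + 1, true) else s) (j, b)).1 by
    intro hf
    rcases h src j false hf with h' | h'
    · exact absurd h' (by simp)
    · exact h'
  intro s
  induction s with
  | nil => intro j b hb; exact Or.inl hb
  | cons c s ih =>
    intro j b
    simp only [List.foldl_cons]
    split
    · intro _
      right
      exact lt_of_lt_of_le (Nat.lt_succ_self j) (foldA_le tgt s (j+1) true)
    · exact ih j b

-- the `while flag and j < len(target)` loop of A
def aLoop (src tgt : List Char) (flag : Bool) (j : Nat) (times : Int) : Int :=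
  if flag = true ∧ j < tgt.length then
    aLoop src tgt (passA src tgt j).2 (passA src tgt j).1 (times + 1)
  else if flag = true then times else -1
termination_by 2 * (tgt.length - j) + (if flag then 1 else 0)
decreasing_by
  rename_i h
  obtain ⟨hflag, hj⟩ := h
  subst hflag
  have h1 := passA_le src tgt j
  by_cases hf : (passA src tgt j).2 = true
  · have h2 := passA_flag src tgt j hf
    simp only [hf, if_pos, if_true]
    omega
  · simp only [Bool.not_eq_true] at hf
    simp [hf]
    omega

def min_sub_times (source : String) (target : String) : Int :=
  if source.toList.length = 0 ∨ target.toList.length = 0 then -1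
  else aLoop source.toList target.toList true 0 0

-- ===== PORT B =====
-- `for c in target:` body of Source B (early `return -1` = the inner -1 branch);
-- source.find(c, cur + 1) / source.find(c) are PySem.Chars.findFrom / find on the char list
def bLoop (src : List Char) : List Char → Int → Int → Int
  | [], times, _ => times
  | c :: r, times, cur =>
    if PySem.Chars.findFrom src [c] (cur + 1) < 0 then
      if PySem.Chars.find src [c] < 0 then -1
      else bLoop src r (times + 1) (PySem.Chars.find src [c])
    else bLoop src r times (PySem.Chars.findFrom src [c] (cur + 1))

def min_sub_times_alt (source : String) (target : String) : Int :=
  if source.toList.length = 0 ∨ target.toList.length = 0 then -1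
  else bLoop source.toList target.toList 1 (-1)

-- ===== PRECONDITION & SPEC =====
def Spec_min_sub_times (source : String) (target : String) (out : Int) : Prop := out = min_sub_times_alt source target
instance (source : String) (target : String) (out : Int) : Decidable (Spec_min_sub_times source target out) := by unfold Spec_min_sub_times; infer_instance

-- ===== CLAIM (what is proved, stated in full; the proofs are below) =====
def Claim_equal_min_sub_times : Prop := ∀ (source : String) (target : String), Dom_min_sub_times source target → Spec_min_sub_times source target (min_sub_times source target)

-- ===== LEMMAS AND PROOFS =====

-- greedy j-advance of one pass of A over the suffix s of source
def greedy (tgt : List Char) : List Char → Nat → Nat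
  | [], j => j
  | c :: s, j => if j < tgt.length ∧ tgt[j]? = some c then greedy tgt s (j+1) else greedy tgt s j

-- smallest index ≥ start at which s holds c
def nextGe : List Char → Char → Nat → Option Nat
  | [], _, _ => none
  | x :: s, c, 0 => if x = c then some 0 else (nextGe s c 0).map (· + 1)
  | _ :: s, c, start+1 => (nextGe s c start).map (· + 1)

-- indices of c in s, in increasing order
def posN : List Char → Char → List Nat
  | [], _ => []
  | x :: s, c => if x = c then 0 :: (posN s c).map (· + 1) else (posN s c).map (· + 1)

-- reference algorithm both ports are reduced to: per target character, jump to the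
-- next occurrence at index ≥ start, wrapping into a fresh copy of source when none is left
def SRun (src : List Char) : List Char → Int → Nat → Int
  | [], times, _ => times
  | c :: r, times, start =>
    match nextGe src c start with
    | some i => SRun src r times (i + 1)
    | none =>
      match nextGe src c 0 with
      | some i0 => SRun src r (times + 1) (i0 + 1)
      | none => -1

theorem greedy_le (tgt : List Char) : ∀ (s : List Char) (j : Nat), j ≤ greedy tgt s j := by
  intro s
  induction s with
  | nil => intro j; simp [greedy]
  | cons c s ih =>
    intro j
    simp only [greedy]
    split
    · exact le_trans (Nat.le_succ j) (ih (j+1))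
    · exact ih j

theorem greedy_le_len (tgt : List Char) : ∀ (s : List Char) (j : Nat), j ≤ tgt.length → greedy tgt s j ≤ tgt.length := by
  intro s
  induction s with
  | nil => intro j h; simpa [greedy]
  | cons c s ih =>
    intro j h
    simp only [greedy]
    split
    · rename_i hc; exact ih (j+1) hc.1
    · exact ih j h

theorem passA_eq (src tgt : List Char) (j : Nat) :
    passA src tgt j = (greedy tgt src j, decide (j < greedy tgt src j)) := by
  suffices h : ∀ (s : List Char) (j : Nat) (b : Bool),
      s.foldl (fun s c => if s.1 < tgt.length ∧ tgt[s.1]? = some c then (s.1 + 1, true) else s) (j, b)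
        = (greedy tgt s j, b || decide (j < greedy tgt s j)) by
    simpa using h src j false
  intro s
  induction s with
  | nil => intro j b; simp [greedy]
  | cons c s ih =>
    intro j b
    simp only [List.foldl_cons, greedy]
    split
    · rw [ih (j+1) true]
      have : j < greedy tgt s (j+1) := lt_of_lt_of_le (Nat.lt_succ_self j) (greedy_le tgt s (j+1))
      simp [this]
    · exact ih j b

theorem greedy_none (tgt : List Char) : ∀ (s : List Char) (j : Nat) (c : Char),
    nextGe s c 0 = none → tgt[j]? = some c → greedy tgt s j = j := by
  intro s
  induction s with
  | nil => intro j c _ _; rfl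
  | cons x s ih =>
    intro j c hn hc
    simp only [nextGe] at hn
    split at hn
    · simp at hn
    · rename_i hx
      simp only [Option.map_eq_none_iff] at hn
      simp only [greedy]
      rw [if_neg]
      · exact ih j c hn hc
      · rintro ⟨-, hx'⟩
        rw [hc] at hx'
        exact hx (by simpa using hx'.symm)

theorem greedy_some (tgt : List Char) : ∀ (s : List Char) (j : Nat) (c : Char) (k : Nat),
    nextGe s c 0 = some k → tgt[j]? = some c → greedy tgt s j = greedy tgt (s.drop (k+1)) (j+1) := by
  intro s
  induction s with
  | nil => intro j c k h; simp [nextGe] at h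
  | cons x s ih =>
    intro j c k hn hc
    simp only [nextGe] at hn
    split at hn
    · rename_i hx
      subst hx
      simp only [Option.some.injEq] at hn
      subst hn
      simp only [greedy, List.drop_succ_cons, List.drop_zero]
      rw [if_pos ⟨(List.getElem?_eq_some_iff.mp hc).1, hc⟩]
    · rename_i hx
      rcases Option.map_eq_some_iff.mp hn with ⟨k', hk', rfl⟩
      simp only [greedy, List.drop_succ_cons]
      rw [if_neg]
      · exact ih j c k' hk' hc
      · rintro ⟨-, hx'⟩
        rw [hc] at hx'
        exact hx (by simpa using hx'.symm)

theorem nextGe_shift (c : Char) : ∀ (start : Nat) (s : List Char),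
    nextGe s c start = (nextGe (s.drop start) c 0).map (· + start) := by
  intro start
  induction start with
  | zero => intro s; simp
  | succ st ih =>
    intro s
    cases s with
    | nil => simp [nextGe]
    | cons x s =>
      simp only [nextGe, List.drop_succ_cons, ih s, Option.map_map]
      rfl

theorem posN_pairwise (c : Char) : ∀ (s : List Char), List.Pairwise (· < ·) (posN s c) := by
  intro s
  induction s with
  | nil => simp [posN]
  | cons x s ih =>
    simp only [posN]
    split
    · refine List.Pairwise.cons ?_ ?_
      · intro y hy
        rcases List.mem_map.mp hy with ⟨v, -, rfl⟩
        omega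
      · exact ih.map _ (fun a b h => by omega)
    · exact ih.map _ (fun a b h => by omega)

theorem posN_lt_length (c : Char) : ∀ (s : List Char) (v : Nat), v ∈ posN s c → v < s.length := by
  intro s
  induction s with
  | nil => simp [posN]
  | cons x s ih =>
    intro v hv
    simp only [posN] at hv
    split at hv
    · rcases List.mem_cons.mp hv with rfl | hv
      · simp
      · rcases List.mem_map.mp hv with ⟨w, hw, rfl⟩
        have := ih w hw; simp; omega
    · rcases List.mem_map.mp hv with ⟨w, hw, rfl⟩
      have := ih w hw; simp; omega

theorem firstGe (c : Char) : ∀ (s : List Char) (start : Nat),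
    (posN s c).find? (fun v => decide (start ≤ v)) = nextGe s c start := by
  intro s
  induction s with
  | nil => intro start; simp [posN, nextGe]
  | cons x s ih =>
    intro start
    cases start with
    | zero =>
      simp only [posN, nextGe]
      split
      · simp
      · rw [List.find?_map]
        rw [show ((fun v => decide (0 ≤ v)) ∘ (· + 1)) = (fun v : Nat => decide (0 ≤ v)) by funext v; simp]
        rw [ih 0]
    | succ st =>
      simp only [posN, nextGe]
      split
      · rw [List.find?_cons_of_neg (by simp)]
        rw [List.find?_map]
        rw [show ((fun v => decide (st + 1 ≤ v)) ∘ (· + 1)) = (fun v : Nat => decide (st ≤ v)) by funext v; simp]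
        rw [ih st]
      · rw [List.find?_map]
        rw [show ((fun v => decide (st + 1 ≤ v)) ∘ (· + 1)) = (fun v : Nat => decide (st ≤ v)) by funext v; simp]
        rw [ih st]

theorem nextGe_lt (c : Char) (s : List Char) (k : Nat) (h : nextGe s c 0 = some k) : k < s.length := by
  rw [← firstGe c s 0] at h
  exact posN_lt_length c s k (List.mem_of_find?_eq_some h)

-- ---- A-side main lemmas: aLoop reduces to the reference jump algorithm SRun ----

theorem SRun_copy (src tgt : List Char) : ∀ (fuel : Nat) (start j : Nat) (t : Int),
    src.length - start ≤ fuel → j ≤ tgt.length →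
    SRun src (tgt.drop j) t start =
      if greedy tgt (src.drop start) j = tgt.length then t
      else SRun src (tgt.drop (greedy tgt (src.drop start) j)) (t+1) 0 := by
  intro fuel
  induction fuel with
  | zero =>
    intro start j t hf hj
    rcases Nat.eq_or_lt_of_le hj with rfl | hjlt
    · have hg : greedy tgt (src.drop start) tgt.length = tgt.length :=
        le_antisymm (greedy_le_len tgt _ _ le_rfl) (greedy_le tgt _ _)
      rw [List.drop_length, hg, if_pos rfl]
      rfl
    · -- src.drop start = [] since src.length ≤ start
      have hds : src.drop start = [] := List.drop_eq_nil_of_le (by omega)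
      have hcj : tgt[j]? = some tgt[j] := List.getElem?_eq_getElem hjlt
      have hn : nextGe src tgt[j] start = none := by
        rw [nextGe_shift, hds]
        rfl
      have hg : greedy tgt (src.drop start) j = j := by
        rw [hds]
        rfl
      rw [List.drop_eq_getElem_cons hjlt, hg, if_neg (by omega)]
      rw [List.drop_eq_getElem_cons hjlt]
      cases hn0 : nextGe src tgt[j] 0 with
      | some i0 => simp only [SRun, hn, hn0]
      | none => simp only [SRun, hn, hn0]
  | succ f ih =>
    intro start j t hf hj
    rcases Nat.eq_or_lt_of_le hj with rfl | hjlt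
    · have hg : greedy tgt (src.drop start) tgt.length = tgt.length :=
        le_antisymm (greedy_le_len tgt _ _ le_rfl) (greedy_le tgt _ _)
      rw [List.drop_length, hg, if_pos rfl]
      rfl
    · have hcj : tgt[j]? = some tgt[j] := List.getElem?_eq_getElem hjlt
      cases hn : nextGe src tgt[j] start with
      | none =>
        have h0 : nextGe (src.drop start) tgt[j] 0 = none := by
          have := nextGe_shift tgt[j] start src
          rw [hn] at this
          exact Option.map_eq_none_iff.mp this.symm
        have hg : greedy tgt (src.drop start) j = j := greedy_none tgt _ j _ h0 hcj
        rw [List.drop_eq_getElem_cons hjlt, hg, if_neg (by omega)]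
        rw [List.drop_eq_getElem_cons hjlt]
        cases hn0 : nextGe src tgt[j] 0 with
        | some i0 => simp only [SRun, hn, hn0]
        | none => simp only [SRun, hn, hn0]
      | some i =>
        have hsh := nextGe_shift tgt[j] start src
        rw [hn] at hsh
        rcases Option.map_eq_some_iff.mp hsh.symm with ⟨k, h0, hik⟩
        have hklt : k < (src.drop start).length := nextGe_lt _ _ _ h0
        have hlen : start < src.length := by
          rw [List.length_drop] at hklt
          omega
        have hg : greedy tgt (src.drop start) j = greedy tgt (src.drop (i+1)) (j+1) := by
          rw [greedy_some tgt _ j _ k h0 hcj, List.drop_drop]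
          congr 2
          omega
        have lhs : SRun src (tgt.drop j) t start = SRun src (tgt.drop (j+1)) t (i+1) := by
          rw [List.drop_eq_getElem_cons hjlt]
          simp only [SRun, hn]
        rw [lhs, ih (i+1) (j+1) t (by rw [List.length_drop] at hklt; omega) hjlt, hg]

theorem aLoop_eq (src tgt : List Char) : ∀ (fuel : Nat) (j : Nat) (t : Int),
    tgt.length - j ≤ fuel → j < tgt.length →
    aLoop src tgt true j t = SRun src (tgt.drop j) (t+1) 0 := by
  intro fuel
  induction fuel with
  | zero => intro j t hf hj; omega
  | succ f ih =>
    intro j t hf hj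
    have hcj : tgt[j]? = some tgt[j] := List.getElem?_eq_getElem hj
    rw [aLoop, if_pos ⟨rfl, hj⟩, passA_eq]
    cases hn : nextGe src tgt[j] 0 with
    | none =>
      have hg : greedy tgt src j = j := greedy_none tgt src j _ hn hcj
      rw [hg]
      simp only [decide_eq_true_eq, Nat.lt_irrefl, decide_false]
      rw [aLoop, if_neg (by simp), if_neg (by simp)]
      rw [List.drop_eq_getElem_cons hj]
      simp only [SRun, hn]
    | some k =>
      have hg : greedy tgt src j = greedy tgt (src.drop (k+1)) (j+1) :=
        greedy_some tgt src j _ k hn hcj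
      have hjlt : j < greedy tgt src j := by
        rw [hg]
        exact lt_of_lt_of_le (Nat.lt_succ_self j) (greedy_le tgt _ _)
      have hjle : greedy tgt src j ≤ tgt.length := greedy_le_len tgt src j (le_of_lt hj)
      rw [show decide (j < greedy tgt src j) = true by simp [hjlt]]
      have rhs := SRun_copy src tgt src.length 0 j (t+1) (by omega) (le_of_lt hj)
      rw [List.drop_zero] at rhs
      rw [rhs]
      rcases Nat.eq_or_lt_of_le hjle with heq | hlt
      · rw [heq, if_pos rfl]
        rw [aLoop, if_neg (by omega), if_pos rfl]
      · rw [if_neg (by omega)]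
        exact ih (greedy tgt src j) (t+1) (by omega) hlt

-- ---- B-side main lemmas: bLoop reduces to SRun ----

theorem posN_mem (c : Char) : ∀ (s : List Char) (v : Nat),
    v ∈ posN s c ↔ ∃ h : v < s.length, s[v] = c := by
  intro s
  induction s with
  | nil => intro v; simp [posN]
  | cons x s ih =>
    intro v
    cases v with
    | zero =>
      simp only [posN]
      split
      · rename_i hx; subst hx; simp
      · rename_i hx
        constructor
        · intro hm
          rcases List.mem_map.mp hm with ⟨w, -, hw⟩
          omega
        · intro ⟨h, hc⟩
          simp at hc
          exact absurd hc hx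
    | succ v =>
      simp only [posN]
      have key : v + 1 ∈ (posN s c).map (· + 1) ↔ v ∈ posN s c := by
        constructor
        · intro hm
          rcases List.mem_map.mp hm with ⟨w, hw, hweq⟩
          have : w = v := by omega
          subst this; exact hw
        · intro hm; exact List.mem_map.mpr ⟨v, hm, rfl⟩
      split
      · rw [List.mem_cons]
        simp only [Nat.succ_ne_zero, false_or]  -- 0 = v+1 impossible (order!)
        rw [key, ih v]
        simp
      · rw [key, ih v]
        simp

theorem nextGe_spec_some (s : List Char) (c : Char) (start i : Nat)
    (h : nextGe s c start = some i) :
    start ≤ i ∧ ∃ hi : i < s.length, s[i] = c ∧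
      ∀ j, start ≤ j → j < i → (hj : j < s.length) → s[j] ≠ c := by
  rw [← firstGe c s start] at h
  have hmem : i ∈ posN s c := List.mem_of_find?_eq_some h
  rcases (posN_mem c s i).mp hmem with ⟨hi, hic⟩
  rcases List.find?_eq_some_iff_getElem.mp h with ⟨hpi, idx, hidx, hgidx, hprev⟩
  simp only [decide_eq_true_eq] at hpi
  refine ⟨hpi, hi, hic, ?_⟩
  intro j hstart hji hj hjc
  have hjmem : j ∈ posN s c := (posN_mem c s j).mpr ⟨hj, hjc⟩
  rcases List.mem_iff_getElem.mp hjmem with ⟨jdx, hjdx, hgjdx⟩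
  have hmono := List.pairwise_iff_getElem.mp (posN_pairwise c s)
  have hjlt : jdx < idx := by
    by_contra hge
    rw [not_lt] at hge
    rcases Nat.eq_or_lt_of_le hge with heq | hgt
    · subst heq
      omega
    · have := hmono idx jdx hidx hjdx hgt
      rw [hgidx, hgjdx] at this
      omega
  have := hprev jdx hjlt
  simp only [Bool.not_eq_eq_eq_not, Bool.not_true, decide_eq_false_iff_not, not_le, hgjdx] at this
  omega

theorem nextGe_eq_none_iff (s : List Char) (c : Char) (start : Nat) :
    nextGe s c start = none ↔ ∀ j, start ≤ j → (hj : j < s.length) → s[j] ≠ c := by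
  rw [← firstGe c s start]
  rw [List.find?_eq_none]
  constructor
  · intro hall j hstart hj hjc
    have := hall j ((posN_mem c s j).mpr ⟨hj, hjc⟩)
    simp only [decide_eq_true_eq] at this
    omega
  · intro hall v hv
    rcases (posN_mem c s v).mp hv with ⟨hvl, hvc⟩
    simp only [decide_eq_true_eq]
    intro hle
    exact hall v hle hvl hvc

theorem prefix_singleton (l : List Char) (c : Char) : [c] <+: l ↔ l.head? = some c := by
  cases l with
  | nil => simp
  | cons x t => simp [List.cons_prefix_cons, eq_comm]

theorem findFrom_nextGe_none (s : List Char) (c : Char) (k : Nat) (hk : k ≤ s.length)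
    (hn : nextGe s c k = none) :
    PySem.Chars.findFrom s [c] (k : Int) = -1 := by
apply (PySem.Chars.findFrom_natCast_eq_neg_one_iff s [c] k hk).mpr
intro hinf
have hmem := (List.singleton_infix_iff c (s.drop k)).mp hinf
rcases List.mem_iff_getElem.mp hmem with ⟨idx, hidx, hgidx⟩
rw [List.getElem_drop] at hgidx
have hlen : k + idx < s.length := by
  rw [List.length_drop] at hidx; omega
exact (nextGe_eq_none_iff s c k).mp hn (k + idx) (by omega) hlen hgidx

theorem findFrom_nextGe_some (s : List Char) (c : Char) (k i : Nat) (hk : k ≤ s.length)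
    (hn : nextGe s c k = some i) :
    PySem.Chars.findFrom s [c] (k : Int) = (i : Int) := by
rcases nextGe_spec_some s c k i hn with ⟨hki, hi, hic, hmin⟩
have hne : PySem.Chars.findFrom s [c] (k : Int) ≠ -1 := by
  intro heq
  apply (PySem.Chars.findFrom_natCast_eq_neg_one_iff s [c] k hk).mp heq
  rw [List.singleton_infix_iff, List.mem_iff_getElem]
  refine ⟨i - k, by rw [List.length_drop]; omega, ?_⟩
  rw [List.getElem_drop]
  simp only [show k + (i - k) = i by omega]
  exact hic
rcases PySem.Chars.findFrom_natCast_spec s [c] k hk hne with ⟨hge, hpre, hminf⟩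
set r := (PySem.Chars.findFrom s [c] (k : Int)).toNat with hr
have hrval : PySem.Chars.findFrom s [c] (k : Int) = (r : Int) := by
  rw [hr]
  omega
have hrc : s[r]? = some c := by
  have := (prefix_singleton _ c).mp hpre
  rw [List.head?_drop] at this
  exact this
have hrlen : r < s.length := (List.getElem?_eq_some_iff.mp hrc).1
have hrc' : s[r] = c := by
  rcases List.getElem?_eq_some_iff.mp hrc with ⟨h1, h2⟩
  exact h2
have hkr : k ≤ r := by omega
have hri : r = i := by
  rcases Nat.lt_trichotomy r i with hlt | heq | hgt
  · exact absurd hrc' (hmin r hkr hlt hrlen)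
  · exact heq
  · exfalso
    refine hminf i hki (by omega) ?_
    rw [prefix_singleton, List.head?_drop]
    rw [List.getElem?_eq_some_iff]
    exact ⟨hi, hic⟩
rw [hrval, hri]

theorem bLoop_eq (src : List Char) : ∀ (rest : List Char) (t : Int) (start : Nat),
    start ≤ src.length →
    bLoop src rest t ((start : Int) - 1) = SRun src rest t start := by
  intro rest
  induction rest with
  | nil => intro t start _; rfl
  | cons c r ih =>
    intro t start hstart
    have harg : ((start : Int) - 1) + 1 = (start : Int) := by ring
    rw [bLoop, harg]
    cases hn : nextGe src c start with
    | some i =>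
      rw [findFrom_nextGe_some src c start i hstart hn]
      rw [if_neg (by omega)]
      rw [show ((i : Int)) = (((i + 1 : Nat) : Int) - 1) by push_cast; ring]
      rw [ih t (i + 1) (by rcases nextGe_spec_some src c start i hn with ⟨-, hi, -⟩; omega)]
      simp only [SRun, hn]
    | none =>
      rw [findFrom_nextGe_none src c start hstart hn]
      rw [if_pos (by norm_num)]
      rw [← PySem.Chars.findFrom_zero]
      cases hn0 : nextGe src c 0 with
      | some i0 =>
        have h0 := findFrom_nextGe_some src c 0 i0 (Nat.zero_le _) hn0
        simp only [Nat.cast_zero] at h0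
        rw [h0]
        rw [if_neg (by omega)]
        rw [show ((i0 : Int)) = (((i0 + 1 : Nat) : Int) - 1) by push_cast; ring]
        rw [ih (t + 1) (i0 + 1) (by rcases nextGe_spec_some src c 0 i0 hn0 with ⟨-, hi, -⟩; omega)]
        simp only [SRun, hn, hn0]
      | none =>
        have h0 := findFrom_nextGe_none src c 0 (Nat.zero_le _) hn0
        simp only [Nat.cast_zero] at h0
        rw [h0]
        rw [if_pos (by norm_num)]
        simp only [SRun, hn, hn0]

-- ===== VERDICT (by name: the statement is the Claim_ definition above) =====
theorem min_sub_times_spec : Claim_equal_min_sub_times := by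
  intro source target _
  unfold Spec_min_sub_times min_sub_times min_sub_times_alt
  by_cases h : source.toList.length = 0 ∨ target.toList.length = 0
  · rw [if_pos h, if_pos h]
  · rw [if_neg h, if_neg h]
    rw [not_or] at h
    have h0 : 0 < target.toList.length := Nat.pos_of_ne_zero h.2
    have ha := aLoop_eq source.toList target.toList target.toList.length 0 0 (by omega) h0
    simp only [List.drop_zero] at ha
    rw [ha, ← bLoop_eq source.toList target.toList (0+1) 0 (Nat.zero_le _)]
    norm_num
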